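-- pv_equiv track=rewrite | github.com/InternScience/CrystalX | inference_repo/crystalx_infer/analysis/compare_aihydroweight_ratio.py | ratio_match_exact
-- ===== SOURCE A (Python) =====
-- def ratio_match_exact(base_counts, ai_counts):
--     if len(base_counts) != len(ai_counts):
--         return False
--
--     for b, a in zip(base_counts, ai_counts):
--         if (b == 0) != (a == 0):
--             return False
--
--     nz_idx = [i for i, b in enumerate(base_counts) if b > 0]
--     if not nz_idx:
--         return sum(ai_counts) == 0
--
--     ref = nz_idx[0]
--     b_ref = base_counts[ref]
--     a_ref = ai_counts[ref]
--     for i in nz_idx[1:]: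
--         if base_counts[i] * a_ref != ai_counts[i] * b_ref:
--             return False
--     return True
-- ===== SOURCE B (Python) =====
-- def ratio_match_exact(base_counts, ai_counts):
--     if len(base_counts) != len(ai_counts):
--         return False
--     ref = None
--     sum_ai = 0
--     for b, a in zip(base_counts, ai_counts):
--         if (b == 0) != (a == 0):
--             return False
--         if b > 0:
--             if ref is None:
--                 ref = (b, a)
--             elif b * ref[1] != a * ref[0]:
--                 return False
--         sum_ai += a
--     if ref is None:
--         return sum_ai == 0
--     return True
-- ===== Notes on version B (the rewrite author's own statement) =====
-- stated objective: alternative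
-- what changed: Fuses A's three passes (zero-alignment scan, materialised nz_idx index table, cross-multiplication loop with repeated indexing) into one single pass over zip(base_counts, ai_counts) that carries the first positive reference pair and a running sum of ai_counts.
import Mathlib
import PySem

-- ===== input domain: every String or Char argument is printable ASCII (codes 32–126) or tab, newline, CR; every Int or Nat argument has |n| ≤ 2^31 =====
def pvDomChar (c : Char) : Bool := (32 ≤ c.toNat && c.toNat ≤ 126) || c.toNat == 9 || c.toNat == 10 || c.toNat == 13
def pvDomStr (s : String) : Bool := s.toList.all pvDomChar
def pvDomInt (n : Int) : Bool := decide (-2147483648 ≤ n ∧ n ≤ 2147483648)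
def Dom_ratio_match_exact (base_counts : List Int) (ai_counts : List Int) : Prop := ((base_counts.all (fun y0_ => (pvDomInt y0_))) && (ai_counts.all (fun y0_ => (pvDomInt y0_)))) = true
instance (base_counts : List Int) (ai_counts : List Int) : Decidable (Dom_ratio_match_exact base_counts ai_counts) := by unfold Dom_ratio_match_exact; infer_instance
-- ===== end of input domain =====

-- B fuses A's three passes (zero-alignment scan, materialised nz_idx index table,
-- cross-multiplication loop) into one single pass over the zipped lists (objective: alternative).

-- ===== PORT A =====
-- first loop of A: `for b, a in zip(...): if (b == 0) != (a == 0): return False`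
def pvA_zero_loop : List (Int × Int) → Bool
  | [] => true
  | (b, a) :: rest => if (decide (b = 0)) != (decide (a = 0)) then false else pvA_zero_loop rest

-- second loop of A over nz_idx[1:]; the indices come from enumerate, so they are
-- always in range and pyGetD is exact for base_counts[i] / ai_counts[i]
def pvA_ratio_loop (base_counts ai_counts : List Int) (b_ref a_ref : Int) : List Int → Bool
  | [] => true
  | i :: t =>
      if PySem.List.pyGetD base_counts i 0 * a_ref ≠ PySem.List.pyGetD ai_counts i 0 * b_ref then
        false
      else pvA_ratio_loop base_counts ai_counts b_ref a_ref t

def ratio_match_exact (base_counts : List Int) (ai_counts : List Int) : Bool :=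
  if base_counts.length ≠ ai_counts.length then false
  else if pvA_zero_loop (base_counts.zip ai_counts) = false then false
  else
    let nz_idx := ((PySem.List.enumerate base_counts).filter (fun p => decide (0 < p.2))).map Prod.fst
    match nz_idx with
    | [] => decide (ai_counts.sum = 0)
    | ref :: rest =>
        pvA_ratio_loop base_counts ai_counts
          (PySem.List.pyGetD base_counts ref 0) (PySem.List.pyGetD ai_counts ref 0) rest

-- ===== PORT B =====
-- the single fused loop of B: state = (ref : first positive pair seen, s : running sum of ai)
def pvB_go : List (Int × Int) → Option (Int × Int) → Int → Bool
  | [], none, s => decide (s = 0)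
  | [], some _, _ => true
  | (b, a) :: rest, ref, s =>
      if (decide (b = 0)) != (decide (a = 0)) then false
      else if 0 < b then
        match ref with
        | none => pvB_go rest (some (b, a)) (s + a)
        | some (br, ar) => if b * ar ≠ a * br then false else pvB_go rest (some (br, ar)) (s + a)
      else pvB_go rest ref (s + a)

def ratio_match_exact_alt (base_counts : List Int) (ai_counts : List Int) : Bool :=
  if base_counts.length ≠ ai_counts.length then false
  else pvB_go (base_counts.zip ai_counts) none 0

-- ===== PRECONDITION & SPEC =====
def Spec_ratio_match_exact (base_counts : List Int) (ai_counts : List Int) (out : Bool) : Prop := out = ratio_match_exact_alt base_counts ai_counts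
instance (base_counts : List Int) (ai_counts : List Int) (out : Bool) : Decidable (Spec_ratio_match_exact base_counts ai_counts out) := by unfold Spec_ratio_match_exact; infer_instance

-- ===== CLAIM (what is proved, stated in full; the proofs are below) =====
def Claim_equal_ratio_match_exact : Prop := ∀ (base_counts : List Int) (ai_counts : List Int), Dom_ratio_match_exact base_counts ai_counts → Spec_ratio_match_exact base_counts ai_counts (ratio_match_exact base_counts ai_counts)

-- ===== LEMMAS AND PROOFS =====

-- if the zero-alignment scan fails somewhere, B's fused loop returns false from any state
theorem pvB_go_false_of_zero_fail : ∀ (L : List (Int × Int)), pvA_zero_loop L = false →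
    ∀ (ref : Option (Int × Int)) (s : Int), pvB_go L ref s = false := by
  intro L
  induction L with
  | nil => simp [pvA_zero_loop]
  | cons p rest ih =>
      obtain ⟨b, a⟩ := p
      intro h ref s
      simp only [pvA_zero_loop, pvB_go] at *
      by_cases hz : (decide (b = 0)) != (decide (a = 0))
      · simp [hz]
      · simp only [hz, Bool.false_eq_true, if_false] at h ⊢
        by_cases hb : 0 < b
        · cases ref with
          | none => simp [hb, ih h]
          | some q =>
              obtain ⟨br, ar⟩ := q
              by_cases hr : b * ar ≠ a * br
              · simp [hb, hr]
              · simp [hb, hr, ih h]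
        · simp [hb, ih h]

-- B's fused loop with the reference already set = the cross-multiplication check on
-- the positive-base pairs of the remaining suffix
theorem pvB_go_some : ∀ (L : List (Int × Int)), pvA_zero_loop L = true →
    ∀ (br ar : Int) (s : Int),
      pvB_go L (some (br, ar)) s =
        (L.filter (fun p => decide (0 < p.1))).all (fun p => decide (p.1 * ar = p.2 * br)) := by
  intro L
  induction L with
  | nil => simp [pvB_go]
  | cons p rest ih =>
      obtain ⟨b, a⟩ := p
      intro h br ar s
      simp only [pvA_zero_loop] at h
      by_cases hz : (decide (b = 0)) != (decide (a = 0))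
      · simp [hz] at h
      · simp only [hz, Bool.false_eq_true, if_false] at h
        simp only [pvB_go, hz, Bool.false_eq_true, if_false, List.filter_cons]
        by_cases hb : 0 < b
        · by_cases hr : b * ar ≠ a * br
          · simp [hb, hr]
          · push Not at hr
            simp [hb, hr, ih h]
        · simp [hb, ih h]

-- B's fused loop from the initial state = A's post-zero-scan logic, phrased on the
-- positive-base pairs of the zipped list
theorem pvB_go_none : ∀ (L : List (Int × Int)), pvA_zero_loop L = true →
    ∀ (s : Int),
      pvB_go L none s =
        match L.filter (fun p => decide (0 < p.1)) with
        | [] => decide (s + (L.map Prod.snd).sum = 0)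
        | (br, ar) :: t => t.all (fun p => decide (p.1 * ar = p.2 * br)) := by
  intro L
  induction L with
  | nil => intro _ s; simp [pvB_go]
  | cons p rest ih =>
      obtain ⟨b, a⟩ := p
      intro h s
      simp only [pvA_zero_loop] at h
      by_cases hz : (decide (b = 0)) != (decide (a = 0))
      · simp [hz] at h
      · simp only [hz, Bool.false_eq_true, if_false] at h
        simp only [pvB_go, hz, Bool.false_eq_true, if_false, List.filter_cons]
        by_cases hb : 0 < b
        · simp only [hb, decide_true, if_true]
          rw [pvB_go_some rest h]
        · simp only [hb, decide_false, if_false]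
          rw [ih h (s + a)]
          cases hF : rest.filter (fun p => decide (0 < p.1)) with
          | nil =>
              simp only [Bool.false_eq_true, if_false, List.map_cons, List.sum_cons]
              rw [decide_eq_decide]
              omega
          | cons q t => simp

-- A's second loop = the cross-multiplication check over the looked-up pairs
theorem pvA_ratio_loop_eq_all (base ai : List Int) (br ar : Int) : ∀ (idxs : List Int),
    pvA_ratio_loop base ai br ar idxs =
      (idxs.map (fun i => (PySem.List.pyGetD base i 0, PySem.List.pyGetD ai i 0))).all
        (fun p => decide (p.1 * ar = p.2 * br)) := by
  intro idxs
  induction idxs with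
  | nil => rfl
  | cons i t ih =>
      simp only [pvA_ratio_loop, List.map_cons, List.all_cons]
      by_cases hr : PySem.List.pyGetD base i 0 * ar ≠ PySem.List.pyGetD ai i 0 * br
      · simp [hr]
      · push Not at hr
        simp [hr, ih]

-- looking each enumerate index back up in the two lists recovers the zipped list
theorem pvEnum_map_lookup (base ai : List Int) (h : base.length = ai.length) :
    (PySem.List.enumerate base).map
        (fun p => (PySem.List.pyGetD base p.1 0, PySem.List.pyGetD ai p.1 0)) =
      base.zip ai := by
  apply List.ext_getElem
  · simp [PySem.List.length_enumerate, h]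
  · intro k h1 h2
    have hk : k < base.length := by
      simpa [PySem.List.length_enumerate] using h1
    have hk' : k < ai.length := by omega
    simp [PySem.List.getElem_enumerate, PySem.List.pyGetD_natCast,
      List.getD_eq_getElem?_getD, hk, hk']

-- for an enumerate pair, looking the index back up gives the stored element
theorem pvLookup_fst_of_mem_enumerate (base : List Int) (p : Int × Int)
    (hp : p ∈ PySem.List.enumerate base) : PySem.List.pyGetD base p.1 0 = p.2 := by
  rw [PySem.List.mem_enumerate_iff] at hp
  obtain ⟨k, hk, rfl⟩ := hp
  simp [PySem.List.pyGetD_natCast, List.getD_eq_getElem?_getD, hk]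

-- the filtered-and-looked-up enumerate pairs = the positive-base pairs of the zip
theorem pvNz_pairs (base ai : List Int) (h : base.length = ai.length) :
    ((PySem.List.enumerate base).filter (fun p => decide (0 < p.2))).map
        (fun p => (PySem.List.pyGetD base p.1 0, PySem.List.pyGetD ai p.1 0)) =
      (base.zip ai).filter (fun q => decide (0 < q.1)) := by
  rw [← pvEnum_map_lookup base ai h, List.filter_map]
  congr 1
  apply List.filter_congr
  intro p hp
  simp [Function.comp, pvLookup_fst_of_mem_enumerate base p hp]

-- ===== VERDICT (by name: the statement is the Claim_ definition above) =====
theorem ratio_match_exact_spec : Claim_equal_ratio_match_exact := by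
  intro base ai _
  unfold Spec_ratio_match_exact ratio_match_exact ratio_match_exact_alt
  by_cases hlen : base.length ≠ ai.length
  · simp [hlen]
  · push Not at hlen
    simp only [hlen, ne_eq, not_true_eq_false, if_false]
    by_cases hz : pvA_zero_loop (base.zip ai) = false
    · simp [hz, pvB_go_false_of_zero_fail _ hz]
    · have hz' : pvA_zero_loop (base.zip ai) = true := by
        cases hh : pvA_zero_loop (base.zip ai) <;> simp_all
      simp only [hz]
      rw [pvB_go_none _ hz' 0]
      have hnz := pvNz_pairs base ai hlen
      cases hG : (PySem.List.enumerate base).filter (fun p => decide (0 < p.2)) with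
      | nil =>
          rw [hG] at hnz
          simp only [List.map_nil] at hnz
          rw [← hnz]
          have : ((base.zip ai).map Prod.snd) = ai := List.map_snd_zip (le_of_eq hlen.symm)
          simp [this]
      | cons g gs =>
          rw [hG] at hnz
          simp only [List.map_cons] at hnz
          rw [← hnz]
          simp only [List.map_cons]
          rw [pvA_ratio_loop_eq_all]
          rw [List.map_map]
          rfl
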